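-- pv_equiv track=rewrite | github.com/kaloyan-marinov/epi-in-python | m_5_3_int_as_array_multiply.py | solution_1__multiply_by_positive_digit
-- ===== SOURCE A (Python) =====
-- from typing import List
--
-- def solution_1__multiply_by_positive_digit(A: List[int], d: int) -> List[int]:
--     running_sum = [0]
--
--     for i in range(1, len(A) + 1):
--         p_i = A[-i] * d
--
--         if 0 <= p_i <= 9:
--             contrib_i = [p_i] + (i - 1) * [0]
--         else:  # i.e. if p_i >= 10
--             contrib_i = [p_i // 10, p_i % 10] + (i - 1) * [0]
--
--         running_sum = solution_1__add(
--             running_sum,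
--             contrib_i,
--         )
--
--     return running_sum
--
-- def solution_1__add(A: List[int], B: List[int]) -> List[int]:
--     if len(A) < len(B):
--         A, B = B, A
--
--     sum = [0] * (len(A) + 1)
--
--     for i in range(1, len(A) + 1):
--         i_th_digit_of_A = A[-i]
--         try:
--             i_th_digit_of_B = B[-i]
--         except IndexError:
--             i_th_digit_of_B = 0
--
--         sum[-i] += i_th_digit_of_A + i_th_digit_of_B
--
--         if sum[-i] >= 10:
--             sum[-i] %= 10
--             sum[-i - 1] += 1
--
--     if sum[0] == 0:
--         return sum[1:]
--     else:
--         return sum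
-- ===== SOURCE B (Python) =====
-- from typing import List
--
-- def _head_add(head: List[int], contrib: List[int], carry: int = 0) -> List[int]:
--     # grade-school addition of the two short aligned tails, capped carry of 1
--     if not head and not contrib:
--         return [1] if carry else []
--     v = (head[0] if head else 0) + (contrib[0] if contrib else 0) + carry
--     if v >= 10:
--         return [v % 10] + _head_add(head[1:], contrib[1:], 1)
--     return [v] + _head_add(head[1:], contrib[1:], 0)
--
-- def solution_1__multiply_by_positive_digit(A: List[int], d: int) -> List[int]:
--     settled = []   # finished low digits, lowest first; never touched again
--     head = [0]     # the O(1)-sized unsettled tail above them, lowest first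
--     for a in reversed(A):
--         p = a * d
--         contrib = [p] if 0 <= p <= 9 else [p % 10, p // 10]
--         new = _head_add(head, contrib)
--         settled.append(new[0])
--         head = new[1:]
--     return list(reversed(settled + head))
-- ===== Notes on version B (the rewrite author's own statement) =====
-- stated objective: faster
-- what changed: replaced the chain of quadratically many full-length schoolbook additions by a single right-to-left pass that keeps the finished low digits (which A's add never revisits) and an O(1)-sized unsettled tail, adding each per-digit contribution only into that tail
import Mathlib
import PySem

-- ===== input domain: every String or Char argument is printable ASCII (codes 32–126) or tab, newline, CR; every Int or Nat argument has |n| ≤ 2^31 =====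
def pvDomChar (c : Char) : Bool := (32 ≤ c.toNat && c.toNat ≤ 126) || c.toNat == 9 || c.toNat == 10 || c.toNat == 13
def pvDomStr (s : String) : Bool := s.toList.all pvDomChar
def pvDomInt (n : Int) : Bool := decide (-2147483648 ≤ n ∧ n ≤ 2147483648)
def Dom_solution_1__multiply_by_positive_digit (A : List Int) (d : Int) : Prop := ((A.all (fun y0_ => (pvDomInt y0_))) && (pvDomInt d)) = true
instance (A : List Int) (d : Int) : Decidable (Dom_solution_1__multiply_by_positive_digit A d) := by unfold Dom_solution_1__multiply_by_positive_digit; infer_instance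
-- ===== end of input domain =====

set_option maxHeartbeats 1000000


-- B replaces A's chain of quadratically many schoolbook additions by one right-to-left pass with a running carry (asymptotically faster).

-- ===== PORT A =====
-- one iteration of the loop in solution_1__add: sum[-i] += A[-i]+B[-i]; carry 1 leftward if ≥ 10
def pvAddStep (X Y : List Int) (s : List Int) (i0 : Nat) : List Int :=
  let i : Nat := i0 + 1
  let ai := ((PySem.List.pyGet? X (-(i : Int))).getD 0)
  let bi := ((PySem.List.pyGet? Y (-(i : Int))).getD 0)   -- try/except IndexError: missing digit is 0
  let j := s.length - i                                   -- natural index of sum[-i]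
  let v := s.getD j 0 + ai + bi
  if 10 ≤ v then
    let s1 := s.set j (PySem.Int.mod v 10)
    s1.set (j - 1) (s1.getD (j - 1) 0 + 1)                -- sum[-i-1] += 1
  else s.set j v

def solution_1__add (A B : List Int) : List Int :=
  let P := if A.length < B.length then (B, A) else (A, B)
  let n := P.1.length
  let s := (List.range n).foldl (pvAddStep P.1 P.2) (List.replicate (n + 1) (0 : Int))
  if s.getD 0 0 = 0 then s.drop 1 else s

-- one iteration of the outer loop: build contrib_i and add it to the running sum
def pvMulAStep (A : List Int) (d : Int) (rs : List Int) (i0 : Nat) : List Int :=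
  let i : Nat := i0 + 1
  let p := ((PySem.List.pyGet? A (-(i : Int))).getD 0) * d
  let contrib :=
    if 0 ≤ p ∧ p ≤ 9 then p :: List.replicate (i - 1) (0 : Int)
    else PySem.Int.floordiv p 10 :: PySem.Int.mod p 10 :: List.replicate (i - 1) (0 : Int)
  solution_1__add rs contrib

def solution_1__multiply_by_positive_digit (A : List Int) (d : Int) : List Int :=
  (List.range A.length).foldl (pvMulAStep A d) [0]

-- ===== PORT B =====
-- grade-school addition of the two short aligned tails (missing entries 0), carry capped at 1
def pvHeadAdd : List Int → List Int → Int → List Int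
  | [], [], c => if c ≠ 0 then [1] else []
  | [], y :: yt, c =>
      let v := 0 + y + c
      if 10 ≤ v then PySem.Int.mod v 10 :: pvHeadAdd [] yt 1
      else v :: pvHeadAdd [] yt 0
  | x :: xt, cl, c =>
      let v := x + cl.headD 0 + c
      if 10 ≤ v then PySem.Int.mod v 10 :: pvHeadAdd xt cl.tail 1
      else v :: pvHeadAdd xt cl.tail 0

-- one iteration of B's pass: settle one low digit, keep the short unsettled tail
def pvMulBStep (d : Int) (st : List Int × List Int) (a : Int) : List Int × List Int :=
  let p := a * d
  let contrib := if 0 ≤ p ∧ p ≤ 9 then [p]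
                 else [PySem.Int.mod p 10, PySem.Int.floordiv p 10]
  let nw := pvHeadAdd st.2 contrib 0
  (st.1 ++ [nw.headD 0], nw.tail)

def solution_1__multiply_by_positive_digit_alt (A : List Int) (d : Int) : List Int :=
  let st := A.reverse.foldl (pvMulBStep d) ([], [0])
  (st.1 ++ st.2).reverse

-- ===== PRECONDITION & SPEC =====
def Spec_solution_1__multiply_by_positive_digit (A : List Int) (d : Int) (out : List Int) : Prop :=
  out = solution_1__multiply_by_positive_digit_alt A d
instance (A : List Int) (d : Int) (out : List Int) :
    Decidable (Spec_solution_1__multiply_by_positive_digit A d out) := by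
  unfold Spec_solution_1__multiply_by_positive_digit; infer_instance

-- ===== CLAIM (what is proved, stated in full; the proofs are below) =====
def Claim_equal_solution_1__multiply_by_positive_digit : Prop :=
  ∀ (A : List Int) (d : Int), Dom_solution_1__multiply_by_positive_digit A d →
    Spec_solution_1__multiply_by_positive_digit A d (solution_1__multiply_by_positive_digit A d)

-- ===== LEMMAS AND PROOFS =====

-- proof-side model of A's add loop: consume the reversed longer list xr against the reversed
-- shorter list yr (missing entries 0), carry c, finished digits f most-significant-first
def addRun : List Int → List Int → Int → List Int → Int × List Int
  | [], _, c, f => (c, f)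
  | x :: xr, yr, c, f =>
      let v := x + yr.headD 0 + c
      if 10 ≤ v then addRun xr yr.tail 1 (PySem.Int.mod v 10 :: f)
      else addRun xr yr.tail 0 (v :: f)

lemma addRun_append (x1 x2 yr : List Int) (c : Int) (f : List Int) :
    addRun (x1 ++ x2) yr c f
      = addRun x2 (yr.drop x1.length) (addRun x1 yr c f).1 (addRun x1 yr c f).2 := by
  induction x1 generalizing yr c f with
  | nil => simp [addRun]
  | cons x xs ih =>
      have hd : ∀ (l : List Int) (k : Nat), l.tail.drop k = l.drop (k + 1) := by
        intro l k; rw [← List.drop_one, List.drop_drop, Nat.add_comm]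
      simp only [List.cons_append, addRun, List.length_cons]
      split <;> rw [ih, hd]

lemma addRun_len (xr yr : List Int) (c : Int) (f : List Int) :
    (addRun xr yr c f).2.length = xr.length + f.length := by
  induction xr generalizing yr c f with
  | nil => simp [addRun]
  | cons x xs ih =>
      simp only [addRun]
      split <;> (rw [ih]; simp only [List.length_cons]; omega)

-- negative indexing A[-(m+1)] (0 on IndexError) reads the reversed list at m
lemma pyNegGetD (L : List Int) (m : Nat) :
    (PySem.List.pyGet? L (-((m + 1 : Nat) : Int))).getD 0 = (L.reverse.drop m).headD 0 := by
  rw [List.headD_eq_head?_getD, List.head?_drop]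
  by_cases h : m < L.length
  · rw [PySem.List.pyGet?_neg_natCast L (m + 1) (by omega) (by omega)]
    rw [List.getElem?_eq_getElem (by omega), List.getElem?_eq_getElem (by simpa using h)]
    simp only [Option.getD_some]
    rw [List.getElem_reverse]
    congr 1
    omega
  · rw [(PySem.List.pyGet?_eq_none_iff L _).2, List.getElem?_eq_none (by simpa using h)]
    simp [PySem.Raise.InRange]
    omega

-- the add loop maintains: sum = zeros ++ carry :: finished
lemma add_loop (X Y : List Int) : ∀ m, m ≤ X.length →
    (List.range m).foldl (pvAddStep X Y) (List.replicate (X.length + 1) (0 : Int))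
      = List.replicate (X.length - m) 0
          ++ (addRun (X.reverse.take m) Y.reverse 0 []).1
            :: (addRun (X.reverse.take m) Y.reverse 0 []).2 := by
  intro m
  induction m with
  | zero =>
      intro _
      simp only [List.range_zero, List.foldl_nil, List.take_zero, addRun, Nat.sub_zero]
      rw [List.replicate_succ']
  | succ m ih =>
      intro hm1
      have hm : m < X.length := by omega
      rw [List.range_succ, List.foldl_append, List.foldl_cons, List.foldl_nil, ih (by omega)]
      have hmr : m < X.reverse.length := by simpa using hm
      have hflen : (addRun (X.reverse.take m) Y.reverse 0 []).2.length = m := by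
        rw [addRun_len]
        simp only [List.length_take, List.length_reverse, List.length_nil]
        omega
      have htake : X.reverse.take (m + 1) = X.reverse.take m ++ [X.reverse[m]'hmr] := by
        rw [List.take_succ, List.getElem?_eq_getElem hmr]
        rfl
      have hlt : (X.reverse.take m).length = m := by
        simp only [List.length_take, List.length_reverse]
        omega
      rw [htake, addRun_append, hlt]
      simp only [addRun]
      set c := (addRun (X.reverse.take m) Y.reverse 0 []).1 with hcv
      set f := (addRun (X.reverse.take m) Y.reverse 0 []).2 with hfv
      set x := X.reverse[m]'hmr with hxv
      set y := (Y.reverse.drop m).headD 0 with hyv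
      have hxx : (X.reverse.drop m).headD 0 = x := by
        rw [hxv, List.headD_eq_head?_getD, List.head?_drop, List.getElem?_eq_getElem hmr]
        rfl
      have hslen : (List.replicate (X.length - m) (0 : Int) ++ c :: f).length = X.length + 1 := by
        simp only [List.length_append, List.length_replicate, List.length_cons, hflen]
        omega
      simp only [pvAddStep, hslen]
      have hj : X.length + 1 - (m + 1) = X.length - m := by omega
      rw [hj, pyNegGetD, pyNegGetD, hxx, ← hyv]
      have hgd : (List.replicate (X.length - m) (0 : Int) ++ c :: f).getD (X.length - m) 0 = c := by
        rw [List.getD_eq_getElem?_getD, List.getElem?_append_right (by simp)]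
        simp
      rw [hgd, show c + x + y = x + y + c from by ring]
      have hsplit : List.replicate (X.length - m) (0 : Int)
          = List.replicate (X.length - m - 1) 0 ++ [0] := by
        rw [← List.replicate_succ']
        congr 1
        omega
      have hset1 : ∀ w : Int, (List.replicate (X.length - m) (0 : Int) ++ c :: f).set (X.length - m) w
          = List.replicate (X.length - m - 1) 0 ++ 0 :: w :: f := by
        intro w
        rw [List.set_append_right _ _ (by simp)]
        simp only [List.length_replicate, Nat.sub_self, List.set_cons_zero]
        rw [hsplit, List.append_assoc]
        rfl
      rw [show X.length - (m + 1) = X.length - m - 1 from by omega]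
      by_cases hcnd : 10 ≤ x + y + c
      · rw [if_pos hcnd, if_pos hcnd, hset1]
        have hgd2 : (List.replicate (X.length - m - 1) (0 : Int)
            ++ 0 :: PySem.Int.mod (x + y + c) 10 :: f).getD (X.length - m - 1) 0 = 0 := by
          rw [List.getD_eq_getElem?_getD, List.getElem?_append_right (by simp)]
          simp
        rw [hgd2, List.set_append_right _ _ (by simp)]
        simp
      · rw [if_neg hcnd, if_neg hcnd, hset1]

-- evaluated solution_1__add when the second argument is not longer (no swap)
lemma add_core (X Y : List Int) (h : Y.length ≤ X.length) :
    solution_1__add X Y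
      = (if (addRun X.reverse Y.reverse 0 []).1 = 0
          then (addRun X.reverse Y.reverse 0 []).2
          else (addRun X.reverse Y.reverse 0 []).1 :: (addRun X.reverse Y.reverse 0 []).2) := by
  simp only [solution_1__add]
  rw [if_neg (show ¬ X.length < Y.length from by omega)]
  dsimp only
  have ht : X.reverse.take X.length = X.reverse := by
    rw [← List.length_reverse]
    exact List.take_length
  rw [add_loop X Y X.length le_rfl, ht]
  simp only [Nat.sub_self, List.replicate_zero, List.nil_append]
  by_cases hc : (addRun X.reverse Y.reverse 0 []).1 = 0
  · rw [if_pos hc, if_pos (by simpa [List.getD_cons_zero] using hc)]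
    simp [List.drop_one]
  · rw [if_neg hc, if_neg (by simpa [List.getD_cons_zero] using hc)]

-- evaluated solution_1__add when the second argument is longer (the swap fires)
lemma add_core' (X Y : List Int) (h : X.length < Y.length) :
    solution_1__add X Y
      = (if (addRun Y.reverse X.reverse 0 []).1 = 0
          then (addRun Y.reverse X.reverse 0 []).2
          else (addRun Y.reverse X.reverse 0 []).1 :: (addRun Y.reverse X.reverse 0 []).2) := by
  simp only [solution_1__add]
  rw [if_pos h]
  dsimp only
  have ht : Y.reverse.take Y.length = Y.reverse := by
    rw [← List.length_reverse]
    exact List.take_length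
  rw [add_loop Y X Y.length le_rfl, ht]
  simp only [Nat.sub_self, List.replicate_zero, List.nil_append]
  by_cases hc : (addRun Y.reverse X.reverse 0 []).1 = 0
  · rw [if_pos hc, if_pos (by simpa [List.getD_cons_zero] using hc)]
    simp [List.drop_one]
  · rw [if_neg hc, if_neg (by simpa [List.getD_cons_zero] using hc)]

-- entries ≤ 9 against zeros create no carry and are copied
lemma addRun_le9_left (s : List Int) (hs : ∀ x ∈ s, x ≤ 9) (rest f : List Int) :
    addRun s (List.replicate s.length 0 ++ rest) 0 f = (0, s.reverse ++ f) := by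
  induction s generalizing rest f with
  | nil => simp [addRun]
  | cons x xs ih =>
      have hx := hs x (by simp)
      simp only [List.length_cons, List.replicate_succ, List.cons_append, addRun,
        List.headD_cons, List.tail_cons]
      rw [if_neg (by omega), ih (fun y hy => hs y (by simp [hy])) rest]
      simp

-- zeros against entries ≤ 9: same
lemma addRun_le9_right (s : List Int) (hs : ∀ x ∈ s, x ≤ 9) (more f : List Int) :
    addRun (List.replicate s.length 0) (s ++ more) 0 f = (0, s.reverse ++ f) := by
  induction s generalizing more f with
  | nil => simp [addRun]
  | cons x xs ih =>
      have hx := hs x (by simp)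
      simp only [List.length_cons, List.replicate_succ, List.cons_append, addRun,
        List.headD_cons, List.tail_cons]
      rw [if_neg (by omega), ih (fun y hy => hs y (by simp [hy])) more]
      simp

-- the finished-digit accumulator factors out
lemma addRun_acc (xr yr : List Int) (c : Int) (f : List Int) :
    addRun xr yr c f = ((addRun xr yr c []).1, (addRun xr yr c []).2 ++ f) := by
  induction xr generalizing yr c f with
  | nil => simp [addRun]
  | cons x xs ih =>
      simp only [addRun]
      split
      · rw [ih yr.tail 1 (PySem.Int.mod (x + yr.headD 0 + c) 10 :: f),
          ih yr.tail 1 [PySem.Int.mod (x + yr.headD 0 + c) 10]]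
        simp
      · rw [ih yr.tail 0 ((x + yr.headD 0 + c) :: f), ih yr.tail 0 [x + yr.headD 0 + c]]
        simp

lemma headAdd_comm (h : List Int) : ∀ (cl : List Int) (c : Int),
    pvHeadAdd h cl c = pvHeadAdd cl h c := by
  induction h with
  | nil =>
      intro cl
      induction cl with
      | nil => intro c; rfl
      | cons y yt ihy =>
          intro c
          simp only [pvHeadAdd, List.headD_nil, List.tail_nil, List.headD_cons, List.tail_cons]
          rw [show y + 0 + c = 0 + y + c from by ring, ihy 1, ihy 0]
  | cons x xt ihx =>
      intro cl c
      cases cl with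
      | nil =>
          simp only [pvHeadAdd, List.headD_nil, List.tail_nil, List.headD_cons, List.tail_cons]
          rw [show x + 0 + c = 0 + x + c from by ring, ihx [] 1, ihx [] 0]
      | cons y yt =>
          simp only [pvHeadAdd, List.headD_cons, List.tail_cons]
          rw [show x + y + c = y + x + c from by ring, ihx yt 1, ihx yt 0]

lemma headAdd_ne_nil (h cl : List Int) (c : Int) (hcl : cl ≠ []) : pvHeadAdd h cl c ≠ [] := by
  cases cl with
  | nil => exact absurd rfl hcl
  | cons y yt =>
      cases h with
      | nil => simp only [pvHeadAdd]; split <;> simp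
      | cons x xt => simp only [pvHeadAdd]; split <;> simp

lemma headAdd_le9 (h : List Int) : ∀ (cl : List Int) (c : Int), ∀ x ∈ pvHeadAdd h cl c, x ≤ 9 := by
  induction h with
  | nil =>
      intro cl
      induction cl with
      | nil =>
          intro c x hx
          simp only [pvHeadAdd] at hx
          split at hx <;> simp_all
      | cons y yt ihy =>
          intro c x hx
          simp only [pvHeadAdd, List.tail_cons] at hx
          split at hx <;> rcases List.mem_cons.mp hx with hh | hh
          · subst hh
            have := PySem.Int.mod_lt (0 + y + c) (show (0:Int) < 10 from by norm_num)
            omega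
          · exact ihy 1 x hh
          · subst hh; omega
          · exact ihy 0 x hh
  | cons z zt ihz =>
      intro cl c x hx
      simp only [pvHeadAdd] at hx
      split at hx <;> rcases List.mem_cons.mp hx with hh | hh
      · subst hh
        have := PySem.Int.mod_lt (z + cl.headD 0 + c) (show (0:Int) < 10 from by norm_num)
        omega
      · exact ihz cl.tail 1 x hh
      · subst hh; omega
      · exact ihz cl.tail 0 x hh

-- B's tail addition is exactly the A-side addRun on the tails, top carry rendered last
lemma headAdd_eq (h : List Int) : ∀ (cl : List Int) (c : Int), (c = 0 ∨ c = 1) →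
    cl.length ≤ h.length →
    pvHeadAdd h cl c
      = (addRun h cl c []).2.reverse
          ++ (if (addRun h cl c []).1 = 0 then [] else [(addRun h cl c []).1]) := by
  induction h with
  | nil =>
      intro cl c hc hlen
      have : cl = [] := List.eq_nil_of_length_eq_zero (by simpa using hlen)
      subst this
      rcases hc with hc | hc <;> subst hc <;> simp [pvHeadAdd, addRun]
  | cons x xt ih =>
      intro cl c hc hlen
      simp only [pvHeadAdd, addRun]
      have htl : cl.tail.length ≤ xt.length := by
        cases cl <;> simp_all <;> omega
      split
      · rw [ih cl.tail 1 (Or.inr rfl) htl]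
        rw [addRun_acc xt cl.tail 1 [PySem.Int.mod (x + cl.headD 0 + c) 10]]
        simp
      · rw [ih cl.tail 0 (Or.inl rfl) htl]
        rw [addRun_acc xt cl.tail 0 [x + cl.headD 0 + c]]
        simp

lemma cons_headD_tail (l : List Int) (hl : l ≠ []) : l.headD 0 :: l.tail = l := by
  cases l with
  | nil => exact absurd rfl hl
  | cons x xs => rfl

-- A's outer loop equals B's pass, with B's settled digits ≤ 9 and one per step
lemma outer (A : List Int) (d : Int) : ∀ k, k ≤ A.length →
    ((List.range k).foldl (pvMulAStep A d) [0]
        = (((A.reverse.take k).foldl (pvMulBStep d) ([], [0])).1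
            ++ ((A.reverse.take k).foldl (pvMulBStep d) ([], [0])).2).reverse)
      ∧ ((A.reverse.take k).foldl (pvMulBStep d) ([], [0])).1.length = k
      ∧ (∀ x ∈ ((A.reverse.take k).foldl (pvMulBStep d) ([], [0])).1
            ++ ((A.reverse.take k).foldl (pvMulBStep d) ([], [0])).2, x ≤ 9) := by
  intro k
  induction k with
  | zero =>
      refine fun _ => ⟨by simp, by simp, ?_⟩
      intro x hx
      simp at hx
      omega
  | succ k ih =>
      intro hk1
      have hk : k < A.length := by omega
      have hkr : k < A.reverse.length := by simpa using hk
      obtain ⟨ihEq, ihLen, ihMem⟩ := ih (by omega)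
      set st := (A.reverse.take k).foldl (pvMulBStep d) ([], [0]) with hst
      have hBfold : (A.reverse.take (k + 1)).foldl (pvMulBStep d) ([], [0])
          = pvMulBStep d st (A.reverse[k]'hkr) := by
        rw [List.take_succ, List.getElem?_eq_getElem hkr, List.foldl_append, ← hst]
        rfl
      rw [List.range_succ, List.foldl_append, List.foldl_cons, List.foldl_nil, ihEq, hBfold]
      simp only [pvMulAStep, pvMulBStep]
      rw [pyNegGetD]
      have hxx : (A.reverse.drop k).headD 0 = A.reverse[k]'hkr := by
        rw [List.headD_eq_head?_getD, List.head?_drop, List.getElem?_eq_getElem hkr]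
        rfl
      rw [hxx]
      set a := A.reverse[k]'hkr with hav
      set s := st.1 with hsv
      set h := st.2 with hhv
      set cl := if 0 ≤ a * d ∧ a * d ≤ 9 then [a * d]
        else [PySem.Int.mod (a * d) 10, PySem.Int.floordiv (a * d) 10] with hclv
      have hclne : cl ≠ [] := by rw [hclv]; split <;> simp
      have hsl : s.length = k := ihLen
      have hs9 : ∀ x ∈ s, x ≤ 9 := fun x hx => ihMem x (List.mem_append_left _ hx)
      simp only [Nat.add_sub_cancel]
      have hctr : (if 0 ≤ a * d ∧ a * d ≤ 9 then a * d :: List.replicate k (0 : Int)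
            else PySem.Int.floordiv (a * d) 10 :: PySem.Int.mod (a * d) 10
              :: List.replicate k 0)
          = (List.replicate s.length (0 : Int) ++ cl).reverse := by
        rw [hclv, hsl]
        split <;> simp
      rw [hctr]
      set nw := pvHeadAdd h cl 0 with hnwv
      have hnwne : nw ≠ [] := headAdd_ne_nil h cl 0 hclne
      have hnw9 : ∀ x ∈ nw, x ≤ 9 := headAdd_le9 h cl 0
      have hcons : (s ++ [nw.headD 0]) ++ nw.tail = s ++ nw := by
        rw [List.append_assoc]
        congr 1
        exact cons_headD_tail nw hnwne
      have hdropRep : ∀ (j : Nat) (l2 : List Int),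
          (List.replicate j (0 : Int) ++ l2).drop j = l2 :=
        fun j l2 => by simpa using List.drop_left (l₁ := List.replicate j (0 : Int)) (l₂ := l2)
      refine ⟨?_, by simp [hsl], ?_⟩
      · -- the running sums agree
        rw [hcons]
        by_cases hlen : cl.length ≤ h.length
        · rw [add_core _ _ (by
            simp only [List.length_reverse, List.length_append, List.length_replicate]
            omega)]
          rw [List.reverse_reverse, List.reverse_reverse, addRun_append]
          rw [addRun_le9_left s hs9 cl []]
          dsimp only
          rw [List.append_nil, hdropRep, addRun_acc h cl 0 s.reverse]
          dsimp only
          have hnweq := headAdd_eq h cl 0 (Or.inl rfl) hlen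
          rw [← hnwv] at hnweq
          by_cases hT : (addRun h cl 0 []).1 = 0
          · rw [if_pos hT, hnweq, hT]
            simp
          · rw [if_neg hT, hnweq]
            simp [hT]
        · rw [add_core' _ _ (by
            simp only [List.length_reverse, List.length_append, List.length_replicate]
            omega)]
          rw [List.reverse_reverse, List.reverse_reverse, addRun_append]
          rw [addRun_le9_right s hs9 h []]
          dsimp only
          simp only [List.length_replicate]
          rw [List.append_nil, List.drop_left, addRun_acc cl h 0 s.reverse]
          dsimp only
          have hnweq := (headAdd_comm h cl 0).trans
            (headAdd_eq cl h 0 (Or.inl rfl) (by omega))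
          rw [← hnwv] at hnweq
          by_cases hT : (addRun cl h 0 []).1 = 0
          · rw [if_pos hT, hnweq, hT]
            simp
          · rw [if_neg hT, hnweq]
            simp [hT]
      · -- all kept entries stay ≤ 9
        intro x hx
        rw [hcons] at hx
        rcases List.mem_append.mp hx with hx | hx
        · exact hs9 x hx
        · exact hnw9 x hx

-- ===== VERDICT (by name: the statement is the Claim_ definition above) =====
theorem solution_1__multiply_by_positive_digit_spec :
    Claim_equal_solution_1__multiply_by_positive_digit := by
  intro A d _hdom
  unfold Spec_solution_1__multiply_by_positive_digit
  unfold solution_1__multiply_by_positive_digit solution_1__multiply_by_positive_digit_alt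
  rw [(outer A d A.length le_rfl).1]
  rw [show A.reverse.take A.length = A.reverse from by
    rw [← List.length_reverse]; exact List.take_length]
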